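-- pv_equiv track=rewrite | github.com/alexandraback/datacollection | solutions_5753053697277952_1/Python/arteffi/solve.py | solve
-- ===== SOURCE A (Python) =====
-- from heapq import heapify, heappush, heappop
--
-- def solve(counts):
--     counts = list(zip([-c for c in counts], [chr(ord('A') + n) for n in range(26)]))
--     heapify(counts)
--     solution = []
--     while counts:
--         step = one_turn(counts)
--         solution.append(step)
--     return solution
--
-- def one_turn(counts):
--     count1, party1 = heappop(counts)
--     # case 1: only one party left
--     if not counts:
--         add_if_any_left(counts, count1 + 1, party1)
--         return party1
--     # case 2: two parties left
--     count2, party2 = heappop(counts)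
--     if not counts:
--         add_if_any_left(counts, count1 + 1, party1)
--         add_if_any_left(counts, count2 + 1, party2)
--         return party1 + party2
--     # case 3: (1, 1, 1)
--     count3, party3 = heappop(counts)
--     if not counts and (count1 == count2 == count3 == -1):
--         heappush(counts, (count2, party2))
--         heappush(counts, (count3, party3))
--         return party1
--     # case 4: (>1, anything, anything, ...)
--     add_if_any_left(counts, count1 + 1, party1)
--     add_if_any_left(counts, count2 + 1, party2)
--     heappush(counts, (count3, party3))
--     return party1 + party2
--
-- def add_if_any_left(counts, count, party):
--     if count != 0:
--         heappush(counts, (count, party))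
-- ===== SOURCE B (Python) =====
-- def solve(counts):
--     remaining = [(chr(ord('A') + i), c) for i, c in enumerate(counts[:26])]
--     steps = []
--     while remaining:
--         remaining.sort(key=lambda pc: (-pc[1], pc[0]))
--         if len(remaining) == 1:
--             p1, c1 = remaining[0]
--             remaining = [(p1, c1 - 1)] if c1 > 1 else []
--             steps.append(p1)
--         elif len(remaining) == 3 and all(c == 1 for _, c in remaining):
--             p1 = remaining[0][0]
--             remaining = remaining[1:]
--             steps.append(p1)
--         else:
--             (p1, c1), (p2, c2) = remaining[0], remaining[1]
--             remaining = ([(p1, c1 - 1)] if c1 > 1 else []) \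
--                       + ([(p2, c2 - 1)] if c2 > 1 else []) + remaining[2:]
--             steps.append(p1 + p2)
--     return steps
-- ===== Notes on version B (the rewrite author's own statement) =====
-- stated objective: simpler
-- what changed: B drops the heap entirely: it keeps a plain (letter, count) list, re-sorts it by (-count, letter) at the top of each turn, and applies a direct three-way case analysis (one party / three parties all at 1 / general top-two decrement), instead of A's heappop/heappush choreography with add_if_any_left re-insertions.
-- outside the precondition, e.g. on solve([0]): A does not finish within the time limit, B returns ['A']; on solve([2, -1]): A does not finish within the time limit, B returns ['AB', 'A']
import Mathlib
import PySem

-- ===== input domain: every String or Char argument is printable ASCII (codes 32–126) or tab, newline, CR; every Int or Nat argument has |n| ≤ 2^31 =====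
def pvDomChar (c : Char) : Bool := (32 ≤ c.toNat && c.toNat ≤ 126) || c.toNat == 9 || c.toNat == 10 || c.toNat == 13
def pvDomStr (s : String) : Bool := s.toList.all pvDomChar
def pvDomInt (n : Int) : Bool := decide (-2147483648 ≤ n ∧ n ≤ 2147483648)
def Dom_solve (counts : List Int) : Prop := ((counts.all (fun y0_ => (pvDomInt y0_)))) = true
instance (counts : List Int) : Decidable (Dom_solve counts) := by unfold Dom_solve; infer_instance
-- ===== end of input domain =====

-- B replaces A's heap by a plain (letter, count) list re-sorted each turn with a direct
-- three-way case analysis; objective: simpler.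

-- Shared fuel bound for both while-loops: each turn retires at least one senator, so the
-- total count bounds the number of turns on inputs satisfying Pre_solve.
def fuelOf (counts : List Int) : Nat := ((counts.take 26).map Int.toNat).sum + 1

-- ===== PORT A =====
-- heapq on (Int, String) tuples (all distinct here: the letters differ) is modeled by its
-- extraction order: the heap is kept as the ascending list of its elements (Python tuple
-- '<' is the lexicographic order, 'toLex'); heappush = ordered insert, heappop = head,
-- heapify = pushing every element. This is exact for the pop/push sequence A performs.
def heapPush (h : List (Int × String)) (x : Int × String) : List (Int × String) :=
  PySem.List.insertBy (fun a b => decide (toLex a < toLex b)) x h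

def heapify (xs : List (Int × String)) : List (Int × String) :=
  xs.foldl heapPush []

def addIfAnyLeft (h : List (Int × String)) (c : Int) (p : String) : List (Int × String) :=
  if c ≠ 0 then heapPush h (c, p) else h

-- one_turn: returns the step string and the heap after the turn
def oneTurn : List (Int × String) → String × List (Int × String)
  | [] => ("", [])
  | (c1, p1) :: h1 =>
    match h1 with
    | [] => (p1, addIfAnyLeft [] (c1 + 1) p1)
    | (c2, p2) :: h2 =>
      match h2 with
      | [] => (p1 ++ p2, addIfAnyLeft (addIfAnyLeft [] (c1 + 1) p1) (c2 + 1) p2)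
      | (c3, p3) :: h3 =>
        if h3 = [] ∧ c1 = -1 ∧ c2 = -1 ∧ c3 = -1 then
          (p1, heapPush (heapPush h3 (c2, p2)) (c3, p3))
        else
          (p1 ++ p2, heapPush (addIfAnyLeft (addIfAnyLeft h3 (c1 + 1) p1) (c2 + 1) p2) (c3, p3))

def loopA : Nat → List (Int × String) → List String
  | 0, _ => []
  | fuel + 1, h =>
    if h.isEmpty then []
    else
      let r := oneTurn h
      r.1 :: loopA fuel r.2

def lettersAZ : List String := (List.range 26).map (fun n => String.singleton (Char.ofNat (65 + n)))

def solve (counts : List Int) : List String :=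
  loopA (fuelOf counts) (heapify (List.zip (counts.map (fun c => -c)) lettersAZ))

-- ===== PORT B =====
-- the Python conditional expression "[(p, c - 1)] if c > 1 else []"
def decPair (p : String) (c : Int) : List (String × Int) :=
  if c > 1 then [(p, c - 1)] else []

def loopB : Nat → List (String × Int) → List String
  | 0, _ => []
  | fuel + 1, rem =>
    if rem.isEmpty then []
    else
      match PySem.List.sorted2 rem (fun pc => -pc.2) (fun pc => pc.1) false with
      | [] => []
      | [(p1, c1)] =>
        p1 :: loopB fuel (decPair p1 c1)
      | (p1, c1) :: (p2, c2) :: rest =>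
        if ((p1, c1) :: (p2, c2) :: rest).length = 3 ∧
            ((p1, c1) :: (p2, c2) :: rest).all (fun pc => pc.2 == 1) then
          p1 :: loopB fuel ((p2, c2) :: rest)
        else
          (p1 ++ p2) :: loopB fuel (decPair p1 c1 ++ decPair p2 c2 ++ rest)

def solve_alt (counts : List Int) : List String :=
  loopB (fuelOf counts)
    ((PySem.List.enumerate (counts.take 26) 0).map
      (fun ic => (String.singleton (Char.ofNat (65 + ic.1.toNat)), ic.2)))

-- ===== PRECONDITION & SPEC =====
-- Pre_ excludes exactly the inputs with a nonpositive count among the first 26 entries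
-- (only those take part: zip truncates at the 26 letters): there A's heap loop re-inserts
-- an ever-growing entry and never returns (diverges), so A returns on no such input.
def Pre_solve (counts : List Int) : Prop := ∀ c ∈ counts.take 26, 1 ≤ c
instance (counts : List Int) : Decidable (Pre_solve counts) := by unfold Pre_solve; infer_instance

def pvWitness_solve : List Int := [2, 3, 1]

def Spec_solve (counts : List Int) (out : List String) : Prop := out = solve_alt counts
instance (counts : List Int) (out : List String) : Decidable (Spec_solve counts out) := by unfold Spec_solve; infer_instance

-- ===== CLAIM (what is proved, stated in full; the proofs are below) =====
def Claim_equal_solve : Prop := ∀ (counts : List Int), Dom_solve counts → Pre_solve counts → Spec_solve counts (solve counts)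

-- ===== LEMMAS AND PROOFS =====

-- B's tuple sort key, as a single lexicographic key, and the coordinate flip that
-- relates B's (letter, count) entries to A's (-count, letter) heap entries.
def keyB (pc : String × Int) : Lex (Int × String) := toLex (-pc.2, pc.1)

def mapNeg (l : List (String × Int)) : List (Int × String) := l.map (fun pc => (-pc.2, pc.1))

theorem insertBy_cons (before : α → α → Bool) (x y : α) (ys : List α) :
    PySem.List.insertBy before x (y :: ys) =
      if before x y then x :: y :: ys else y :: PySem.List.insertBy before x ys := by
  simp [PySem.List.insertBy]

theorem heapPush_perm (h : List (Int × String)) (x : Int × String) :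
    (heapPush h x).Perm (x :: h) := by
  induction h with
  | nil => exact List.Perm.refl _
  | cons y ys ih =>
    unfold heapPush at *
    rw [insertBy_cons]
    split
    · exact List.Perm.refl _
    · exact (ih.cons y).trans (List.Perm.swap x y ys)

theorem heapPush_pairwise (h : List (Int × String)) (x : Int × String)
    (hs : h.Pairwise (fun a b => toLex a < toLex b))
    (hne : ∀ y ∈ h, y.2 ≠ x.2) :
    (heapPush h x).Pairwise (fun a b => toLex a < toLex b) := by
  induction h with
  | nil => simp [heapPush, PySem.List.insertBy]
  | cons y ys ih =>
    rw [List.pairwise_cons] at hs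
    unfold heapPush
    rw [insertBy_cons]
    split
    · rename_i hxy
      rw [decide_eq_true_eq] at hxy
      exact List.Pairwise.cons (fun z hz => by
        rw [List.mem_cons] at hz
        rcases hz with rfl | hz2
        · exact hxy
        · exact hxy.trans (hs.1 z hz2)) (List.Pairwise.cons hs.1 hs.2)
    · rename_i hxy
      rw [decide_eq_true_eq] at hxy
      have hyx : toLex y < toLex x := by
        rcases lt_trichotomy (toLex y) (toLex x) with h | h | h
        · exact h
        · exact absurd (congrArg (fun z => (ofLex z).2) h) (hne y (by simp))
        · exact absurd h hxy
      refine List.Pairwise.cons ?_ (ih hs.2 (fun z hz => hne z (by simp [hz])))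
      intro z hz
      rw [PySem.List.mem_insertBy] at hz
      rcases hz with rfl | hz
      · exact hyx
      · exact hs.1 z hz

theorem bSort_eq_sorted (rem : List (String × Int)) :
    PySem.List.sorted2 rem (fun pc => -pc.2) (fun pc => pc.1) false =
      PySem.List.sorted rem keyB false := by
  have hbf : (fun (a b : String × Int) =>
        (decide (-a.2 < -b.2) || (!decide (-b.2 < -a.2) && decide (a.1 < b.1))))
      = (fun (a b : String × Int) => decide (keyB a < keyB b)) := by
    funext a b
    have hiff : (keyB a < keyB b) ↔ (-a.2 < -b.2 ∨ (-a.2 = -b.2 ∧ a.1 < b.1)) := by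
      simp [keyB, Prod.Lex.lt_iff]
    by_cases h1 : -a.2 < -b.2 <;> by_cases h2 : -b.2 < -a.2 <;>
      by_cases h3 : a.1 < b.1 <;> simp [h1, h2, h3, hiff] <;> omega
  show rem.foldl (fun acc x => PySem.List.insertBy (fun a b =>
        (decide (-a.2 < -b.2) || (!decide (-b.2 < -a.2) && decide (a.1 < b.1)))) x acc) []
      = rem.foldl (fun acc x => PySem.List.insertBy (fun a b =>
        decide (keyB a < keyB b)) x acc) []
  rw [hbf]

theorem sortChar (l : List (String × Int)) (ys : List (Int × String))
    (hperm : ys.Perm (mapNeg l))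
    (hsort : ys.Pairwise (fun a b => toLex a < toLex b)) :
    mapNeg (PySem.List.sorted2 l (fun pc => -pc.2) (fun pc => pc.1) false) = ys := by
  rw [bSort_eq_sorted]
  have hmapid : (mapNeg l).map (fun cp : Int × String => (cp.2, -cp.1)) = l := by
    simp [mapNeg, List.map_map, Function.comp_def]
  have h1 : (ys.map (fun cp : Int × String => (cp.2, -cp.1))).Perm l := by
    simpa [hmapid] using hperm.map (fun cp : Int × String => (cp.2, -cp.1))
  have h2 : (ys.map (fun cp : Int × String => (cp.2, -cp.1))).Pairwise
      (fun a b => keyB a < keyB b) := by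
    rw [List.pairwise_map]
    refine hsort.imp ?_
    intro a b hab
    simpa [keyB] using hab
  rw [PySem.List.sorted_eq_of_perm_of_pairwise_lt l _ keyB h1 h2]
  simp [mapNeg, List.map_map, Function.comp_def]

theorem addIf_perm (h : List (Int × String)) (c : Int) (p : String) :
    (addIfAnyLeft h c p).Perm ((if c ≠ 0 then [(c, p)] else []) ++ h) := by
  unfold addIfAnyLeft
  split
  · exact heapPush_perm h (c, p)
  · exact List.Perm.refl _

theorem addIf_pairwise (h : List (Int × String)) (c : Int) (p : String)
    (hs : h.Pairwise (fun a b => toLex a < toLex b))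
    (hne : ∀ y ∈ h, y.2 ≠ p) :
    (addIfAnyLeft h c p).Pairwise (fun a b => toLex a < toLex b) := by
  unfold addIfAnyLeft
  split
  · exact heapPush_pairwise h (c, p) hs hne
  · exact hs

theorem addIf_mem (h : List (Int × String)) (c : Int) (p : String) (y : Int × String)
    (hy : y ∈ addIfAnyLeft h c p) : y = (c, p) ∨ y ∈ h := by
  have := (addIf_perm h c p).mem_iff.mp hy
  rw [List.mem_append] at this
  rcases this with h1 | h1
  · left; split at h1 <;> simp_all
  · right; exact h1

theorem decPair_mapNeg (p : String) (c : Int) (hc : 1 ≤ c) :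
    mapNeg (decPair p c) = (if -c + 1 ≠ 0 then [(-c + 1, p)] else []) := by
  unfold decPair
  by_cases h : c > 1
  · rw [if_pos h, if_pos (by omega)]
    simp [mapNeg]
    omega
  · rw [if_neg h, if_neg (by omega)]
    rfl

theorem decPair_fst_sublist (p : String) (c : Int) :
    ((decPair p c).map Prod.fst).Sublist [p] := by
  unfold decPair; split <;> simp

theorem decPair_pos (p : String) (c : Int) (pc : String × Int) (h : pc ∈ decPair p c) :
    1 ≤ pc.2 := by
  unfold decPair at h
  split at h <;> simp_all

theorem order_pairwise (rem : List (String × Int)) (hnd : (rem.map Prod.fst).Nodup) :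
    (mapNeg (PySem.List.sorted2 rem (fun pc => -pc.2) (fun pc => pc.1) false)).Pairwise
      (fun a b => toLex a < toLex b) := by
  rw [bSort_eq_sorted]
  have hperm : (PySem.List.sorted rem keyB false).Perm rem := PySem.List.sorted_perm rem keyB false
  have hle : (PySem.List.sorted rem keyB false).Pairwise (fun a b => keyB a ≤ keyB b) :=
    PySem.List.sorted_pairwise rem keyB
  have hndS : ((PySem.List.sorted rem keyB false).map Prod.fst).Nodup :=
    (List.Perm.nodup_iff (hperm.map Prod.fst)).mpr hnd
  have hne : (PySem.List.sorted rem keyB false).Pairwise (fun a b => a.1 ≠ b.1) := by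
    rw [List.nodup_iff_pairwise_ne, List.pairwise_map] at hndS
    exact hndS
  have hlt : (PySem.List.sorted rem keyB false).Pairwise (fun a b => keyB a < keyB b) := by
    refine (hle.and hne).imp ?_
    rintro a b ⟨h1, h2⟩
    refine lt_of_le_of_ne h1 (fun hk => h2 ?_)
    have := toLex.injective (α := Int × String) hk
    exact congrArg Prod.snd this
  rw [mapNeg, List.pairwise_map]
  exact hlt.imp (fun {a b} hab => hab)

theorem foldl_heapPush_perm (xs acc : List (Int × String)) :
    (xs.foldl heapPush acc).Perm (acc ++ xs) := by
  induction xs generalizing acc with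
  | nil => simp
  | cons x xs ih =>
    simp only [List.foldl_cons]
    refine ((ih _).trans ?_)
    refine ((heapPush_perm acc x).append_right xs).trans ?_
    exact (List.perm_middle).symm

theorem foldl_heapPush_pairwise (xs acc : List (Int × String))
    (hacc : acc.Pairwise (fun a b => toLex a < toLex b))
    (hnd : (acc.map Prod.snd ++ xs.map Prod.snd).Nodup) :
    (xs.foldl heapPush acc).Pairwise (fun a b => toLex a < toLex b) := by
  induction xs generalizing acc with
  | nil => exact hacc
  | cons x xs ih =>
    simp only [List.foldl_cons]
    have hdisj := (List.nodup_append.mp hnd).2.2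
    have hxnotin : ∀ y ∈ acc, y.2 ≠ x.2 := by
      intro y hy heq
      exact hdisj y.2 (List.mem_map_of_mem hy) x.2 (by simp) heq
    refine ih _ (heapPush_pairwise acc x hacc hxnotin) ?_
    have hpm : ((heapPush acc x).map Prod.snd).Perm (x.2 :: acc.map Prod.snd) :=
      (heapPush_perm acc x).map Prod.snd
    have hp2 : ((heapPush acc x).map Prod.snd ++ xs.map Prod.snd).Perm
        (acc.map Prod.snd ++ (x.2 :: xs.map Prod.snd)) :=
      ((hpm.append_right _).trans (List.perm_middle).symm)
    exact (List.Perm.nodup_iff hp2).mpr (by simpa using hnd)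

theorem main_loop (fuel : Nat) (rem : List (String × Int))
    (hnd : (rem.map Prod.fst).Nodup) (hpos : ∀ pc ∈ rem, 1 ≤ pc.2) :
    loopA fuel (mapNeg (PySem.List.sorted2 rem (fun pc => -pc.2) (fun pc => pc.1) false)) =
      loopB fuel rem := by
  induction fuel generalizing rem with
  | zero => rfl
  | succ n ih =>
    by_cases hrem : rem = []
    · subst hrem; rfl
    · have hre : rem.isEmpty = false := by simpa [List.isEmpty_iff] using hrem
      have hperm := PySem.List.sorted2_perm rem (fun pc => -pc.2) (fun pc => pc.1) false
      have hOP := order_pairwise rem hnd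
      have hndO : ((PySem.List.sorted2 rem (fun pc => -pc.2) (fun pc => pc.1) false).map
          Prod.fst).Nodup := (List.Perm.nodup_iff (hperm.map Prod.fst)).mpr hnd
      have hposO : ∀ pc ∈ PySem.List.sorted2 rem (fun pc => -pc.2) (fun pc => pc.1) false,
          1 ≤ pc.2 := fun pc hpc => hpos pc (hperm.subset hpc)
      rcases horder : PySem.List.sorted2 rem (fun pc => -pc.2) (fun pc => pc.1) false with
        _ | ⟨⟨p1, c1⟩, t⟩
      · exact absurd ((horder ▸ hperm).symm.eq_nil) hrem
      · rw [horder] at hOP hndO hposO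
        rcases t with _ | ⟨⟨p2, c2⟩, t2⟩
        · -- exactly one party left
          have hc1 : 1 ≤ c1 := hposO (p1, c1) (by simp)
          have hstate : mapNeg (PySem.List.sorted2 (decPair p1 c1)
                (fun pc => -pc.2) (fun pc => pc.1) false)
              = addIfAnyLeft [] (-c1 + 1) p1 := by
            by_cases h1 : c1 > 1
            · rw [show decPair p1 c1 = [(p1, c1 - 1)] from if_pos h1]
              rw [show PySem.List.sorted2 [(p1, c1 - 1)]
                  (fun pc => -pc.2) (fun pc => pc.1) false = [(p1, c1 - 1)] from rfl]
              rw [addIfAnyLeft, if_pos (by omega : -c1 + 1 ≠ 0)]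
              simp [mapNeg, heapPush, PySem.List.insertBy]
              omega
            · rw [show decPair p1 c1 = [] from if_neg h1]
              rw [addIfAnyLeft, if_neg (by omega : ¬ (-c1 + 1 ≠ 0))]
              rfl
          have hlhs : loopA (n + 1) (mapNeg [(p1, c1)])
              = p1 :: loopA n (addIfAnyLeft [] (-c1 + 1) p1) := by
            simp [mapNeg, loopA, oneTurn]
          have hrhs : loopB (n + 1) rem = p1 :: loopB n (decPair p1 c1) := by
            simp only [loopB, hre, Bool.false_eq_true, if_false, horder]
          rw [hlhs, hrhs, ← hstate]
          exact congrArg _ (ih (decPair p1 c1)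
            ((decPair_fst_sublist p1 c1).nodup (by simp))
            (fun pc hpc => decPair_pos p1 c1 pc hpc))
        · rcases t2 with _ | ⟨⟨p3, c3⟩, t3⟩
          · -- exactly two parties left
            have hc1 : 1 ≤ c1 := hposO (p1, c1) (by simp)
            have hc2 : 1 ≤ c2 := hposO (p2, c2) (by simp)
            have hp12 : p1 ≠ p2 := by simpa using hndO
            have hinnerP : (addIfAnyLeft [] (-c1 + 1) p1).Pairwise
                (fun a b => toLex a < toLex b) := addIf_pairwise [] _ _ (by simp) (by simp)
            have hsort' : (addIfAnyLeft (addIfAnyLeft [] (-c1 + 1) p1) (-c2 + 1) p2).Pairwise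
                (fun a b => toLex a < toLex b) := by
              refine addIf_pairwise _ _ _ hinnerP ?_
              intro y hy
              rcases addIf_mem [] _ _ y hy with rfl | hy2
              · exact hp12
              · simp at hy2
            have hm : mapNeg (decPair p1 c1 ++ decPair p2 c2 ++ []) =
                (if -c1 + 1 ≠ 0 then [(-c1 + 1, p1)] else []) ++
                  ((if -c2 + 1 ≠ 0 then [(-c2 + 1, p2)] else []) ++ []) := by
              simp only [mapNeg, List.map_append]
              rw [← mapNeg, ← mapNeg, ← mapNeg, decPair_mapNeg p1 c1 hc1,
                decPair_mapNeg p2 c2 hc2]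
              simp [mapNeg]
            have hperm' : (addIfAnyLeft (addIfAnyLeft [] (-c1 + 1) p1) (-c2 + 1) p2).Perm
                (mapNeg (decPair p1 c1 ++ decPair p2 c2 ++ [])) := by
              rw [hm]
              refine (addIf_perm _ _ _).trans ?_
              refine ((addIf_perm [] (-c1 + 1) p1).append_left _).trans ?_
              simp only [List.append_nil]
              exact List.perm_append_comm
            have hstate := sortChar (decPair p1 c1 ++ decPair p2 c2 ++ []) _ hperm' hsort'
            have hlhs : loopA (n + 1) (mapNeg [(p1, c1), (p2, c2)])
                = (p1 ++ p2) :: loopA n (addIfAnyLeft (addIfAnyLeft [] (-c1 + 1) p1) (-c2 + 1) p2) := by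
              simp [mapNeg, loopA, oneTurn]
            have hrhs : loopB (n + 1) rem
                = (p1 ++ p2) :: loopB n (decPair p1 c1 ++ decPair p2 c2 ++ []) := by
              simp only [loopB, hre, Bool.false_eq_true, if_false, horder]
              rw [if_neg (by simp)]
            rw [hlhs, hrhs, ← hstate]
            refine congrArg _ (ih _ ?_ ?_)
            · have hsub : (((decPair p1 c1 ++ decPair p2 c2 ++ []).map Prod.fst)).Sublist
                  ([p1] ++ [p2] ++ []) := by
                simp only [List.map_append]
                exact ((decPair_fst_sublist p1 c1).append (decPair_fst_sublist p2 c2)).append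
                  (List.Sublist.refl _)
              exact hsub.nodup (by simp [hp12])
            · intro pc hpc
              rcases List.mem_append.mp hpc with h | h
              · rcases List.mem_append.mp h with h2 | h2
                · exact decPair_pos p1 c1 pc h2
                · exact decPair_pos p2 c2 pc h2
              · simp at h
          · -- three or more parties left
            have hc1 : 1 ≤ c1 := hposO (p1, c1) (by simp)
            have hc2 : 1 ≤ c2 := hposO (p2, c2) (by simp)
            have hc3 : 1 ≤ c3 := hposO (p3, c3) (by simp)
            have hndO' := hndO
            simp only [List.map_cons, List.nodup_cons, List.mem_cons, List.mem_map] at hndO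
            have hp12 : p1 ≠ p2 := fun h => hndO.1 (Or.inl h)
            have hp13 : p1 ≠ p3 := fun h => hndO.1 (Or.inr (Or.inl h))
            have hp23 : p2 ≠ p3 := fun h => hndO.2.1 (Or.inl h)
            have hb1 : ∀ y ∈ mapNeg t3, y.2 ≠ p1 := by
              intro y hy h
              exact hndO.1 (Or.inr (Or.inr (by
                simp only [mapNeg, List.mem_map] at hy
                obtain ⟨pc, hpc, rfl⟩ := hy
                exact ⟨pc, hpc, h⟩)))
            have hb2 : ∀ y ∈ mapNeg t3, y.2 ≠ p2 := by
              intro y hy h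
              exact hndO.2.1 (Or.inr (by
                simp only [mapNeg, List.mem_map] at hy
                obtain ⟨pc, hpc, rfl⟩ := hy
                exact ⟨pc, hpc, h⟩))
            have hb3 : ∀ y ∈ mapNeg t3, y.2 ≠ p3 := by
              intro y hy h
              exact hndO.2.2.1 (by
                simp only [mapNeg, List.mem_map] at hy
                obtain ⟨pc, hpc, rfl⟩ := hy
                exact ⟨pc, hpc, h⟩)
            have hbase : (mapNeg t3).Pairwise (fun a b => toLex a < toLex b) := by
              simp only [mapNeg, List.map_cons] at hOP
              exact ((hOP.tail).tail).tail
            by_cases hsp : t3 = [] ∧ c1 = 1 ∧ c2 = 1 ∧ c3 = 1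
            · obtain ⟨rfl, rfl, rfl, rfl⟩ := hsp
              have hlhs : loopA (n + 1) (mapNeg [(p1, 1), (p2, 1), (p3, 1)])
                  = p1 :: loopA n (heapPush (heapPush [] ((-1 : Int), p2)) ((-1 : Int), p3)) := by
                simp [mapNeg, loopA, oneTurn]
              have hrhs : loopB (n + 1) rem = p1 :: loopB n [(p2, 1), (p3, 1)] := by
                simp only [loopB, hre, Bool.false_eq_true, if_false, horder]
                rw [if_pos (by simp)]
              have hsort' : (heapPush (heapPush [] ((-1 : Int), p2)) ((-1 : Int), p3)).Pairwise
                  (fun a b => toLex a < toLex b) := by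
                refine heapPush_pairwise _ _ (heapPush_pairwise [] _ (by simp) (by simp)) ?_
                intro y hy
                have : y = ((-1 : Int), p2) := by
                  simpa [heapPush, PySem.List.insertBy] using hy
                subst this
                exact hp23
              have hperm' : (heapPush (heapPush [] ((-1 : Int), p2)) ((-1 : Int), p3)).Perm
                  (mapNeg [(p2, 1), (p3, 1)]) := by
                refine (heapPush_perm _ _).trans ?_
                simp only [mapNeg, List.map_cons, List.map_nil]
                exact List.Perm.swap _ _ _
              have hstate := sortChar [(p2, 1), (p3, 1)] _ hperm' hsort'
              rw [hlhs, hrhs, ← hstate]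
              refine congrArg _ (ih _ ?_ ?_)
              · simp [hp23]
              · intro pc hpc
                simp only [List.mem_cons, List.not_mem_nil, or_false] at hpc
                rcases hpc with rfl | rfl <;> simp
            · have hnA : ¬(List.map (fun pc : String × Int => (-pc.2, pc.1)) t3 = [] ∧
                  -c1 = -1 ∧ -c2 = -1 ∧ -c3 = -1) := by
                rintro ⟨ha, hb, hc, hd⟩
                exact hsp ⟨List.map_eq_nil_iff.mp ha, by omega, by omega, by omega⟩
              have hnB : ¬(((p1, c1) :: (p2, c2) :: (p3, c3) :: t3).length = 3 ∧
                  ((p1, c1) :: (p2, c2) :: (p3, c3) :: t3).all (fun pc => pc.2 == 1)) := by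
                rintro ⟨hl, ha⟩
                simp only [List.length_cons] at hl
                simp only [List.all_cons, Bool.and_eq_true, beq_iff_eq] at ha
                exact hsp ⟨List.length_eq_zero_iff.mp (by omega), ha.1, ha.2.1, ha.2.2.1⟩
              have hlhs : loopA (n + 1) (mapNeg ((p1, c1) :: (p2, c2) :: (p3, c3) :: t3))
                  = (p1 ++ p2) :: loopA n (heapPush (addIfAnyLeft (addIfAnyLeft
                      (mapNeg t3) (-c1 + 1) p1) (-c2 + 1) p2) (-c3, p3)) := by
                simp only [mapNeg, List.map_cons, loopA, List.isEmpty_cons, Bool.false_eq_true,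
                  if_false, oneTurn]
                rw [if_neg hnA]
              have hrhs : loopB (n + 1) rem = (p1 ++ p2) ::
                  loopB n (decPair p1 c1 ++ decPair p2 c2 ++ ((p3, c3) :: t3)) := by
                simp only [loopB, hre, Bool.false_eq_true, if_false, horder]
                rw [if_neg hnB]
              have hsortI1 : (addIfAnyLeft (mapNeg t3) (-c1 + 1) p1).Pairwise
                  (fun a b => toLex a < toLex b) :=
                addIf_pairwise _ _ _ hbase hb1
              have hsortI2 : (addIfAnyLeft (addIfAnyLeft (mapNeg t3) (-c1 + 1) p1)
                  (-c2 + 1) p2).Pairwise (fun a b => toLex a < toLex b) := by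
                refine addIf_pairwise _ _ _ hsortI1 ?_
                intro y hy
                rcases addIf_mem _ _ _ y hy with rfl | hy2
                · exact hp12
                · exact hb2 y hy2
              have hsort' : (heapPush (addIfAnyLeft (addIfAnyLeft (mapNeg t3) (-c1 + 1) p1)
                  (-c2 + 1) p2) (-c3, p3)).Pairwise (fun a b => toLex a < toLex b) := by
                refine heapPush_pairwise _ _ hsortI2 ?_
                intro y hy
                rcases addIf_mem _ _ _ y hy with rfl | hy2
                · exact hp23
                · rcases addIf_mem _ _ _ y hy2 with rfl | hy3
                  · exact hp13
                  · exact hb3 y hy3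
              have hm : mapNeg (decPair p1 c1 ++ decPair p2 c2 ++ ((p3, c3) :: t3)) =
                  (if -c1 + 1 ≠ 0 then [(-c1 + 1, p1)] else []) ++
                    ((if -c2 + 1 ≠ 0 then [(-c2 + 1, p2)] else []) ++ ((-c3, p3) :: mapNeg t3)) := by
                simp only [mapNeg, List.map_append, List.map_cons]
                rw [← mapNeg, ← mapNeg, ← mapNeg, decPair_mapNeg p1 c1 hc1,
                  decPair_mapNeg p2 c2 hc2]
                simp [mapNeg]
              have hperm' : (heapPush (addIfAnyLeft (addIfAnyLeft (mapNeg t3) (-c1 + 1) p1)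
                  (-c2 + 1) p2) (-c3, p3)).Perm
                  (mapNeg (decPair p1 c1 ++ decPair p2 c2 ++ ((p3, c3) :: t3))) := by
                rw [hm]
                refine (heapPush_perm _ _).trans ?_
                refine (((addIf_perm _ _ _).trans
                  ((addIf_perm _ _ _).append_left _)).cons _).trans ?_
                rw [← List.append_assoc, ← List.append_assoc]
                refine (List.perm_middle).symm.trans ?_
                refine (List.perm_append_comm.append_right _).trans ?_
                rw [List.append_assoc]
              have hstate := sortChar (decPair p1 c1 ++ decPair p2 c2 ++ ((p3, c3) :: t3)) _
                hperm' hsort'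
              rw [hlhs, hrhs, ← hstate]
              refine congrArg _ (ih _ ?_ ?_)
              · have hsub : (((decPair p1 c1 ++ decPair p2 c2 ++ ((p3, c3) :: t3)).map
                    Prod.fst)).Sublist ([p1] ++ [p2] ++ (p3 :: t3.map Prod.fst)) := by
                  simp only [List.map_append, List.map_cons]
                  exact ((decPair_fst_sublist p1 c1).append (decPair_fst_sublist p2 c2)).append
                    (List.Sublist.refl _)
                exact hsub.nodup (by simpa using hndO')
              · intro pc hpc
                rcases List.mem_append.mp hpc with h | h
                · rcases List.mem_append.mp h with h2 | h2
                  · exact decPair_pos p1 c1 pc h2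
                  · exact decPair_pos p2 c2 pc h2
                · simp only [List.mem_cons] at h
                  rcases h with rfl | h2
                  · exact hc3
                  · exact hposO pc (by simp [h2])

theorem singleton_ofNat_inj (a b : Nat) (ha : a < 26) (hb : b < 26)
    (h : String.singleton (Char.ofNat (65 + a)) = String.singleton (Char.ofNat (65 + b))) :
    a = b := by
  have h2 : Char.ofNat (65 + a) = Char.ofNat (65 + b) := by
    have := congrArg (fun s => s.toList) h
    simpa using this
  have h3 := congrArg Char.toNat h2
  rw [Char.toNat_ofNat, Char.toNat_ofNat, if_pos (Or.inl (by omega)),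
    if_pos (Or.inl (by omega))] at h3
  omega

theorem init_eq (counts : List Int) :
    mapNeg ((PySem.List.enumerate (counts.take 26) 0).map
        (fun ic => (String.singleton (Char.ofNat (65 + ic.1.toNat)), ic.2)))
      = List.zip (counts.map (fun c => -c)) lettersAZ := by
  apply List.ext_getElem
  · simp [mapNeg, PySem.List.length_enumerate, lettersAZ]
    omega
  · intro i h1 h2
    simp [mapNeg, PySem.List.getElem_enumerate, List.getElem_zip, lettersAZ,
      List.getElem_take]

theorem init_nodup (counts : List Int) :
    ((((PySem.List.enumerate (counts.take 26) 0).map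
        (fun ic => (String.singleton (Char.ofNat (65 + ic.1.toNat)), ic.2)))).map
      Prod.fst).Nodup := by
  rw [List.map_map]
  rw [List.nodup_iff_pairwise_ne, List.pairwise_map]
  refine List.Pairwise.imp_of_mem ?_ (PySem.List.pairwise_lt_enumerate (counts.take 26) 0)
  intro p q hp hq hlt heq
  rw [PySem.List.mem_enumerate_iff] at hp hq
  obtain ⟨k1, hk1, rfl⟩ := hp
  obtain ⟨k2, hk2, rfl⟩ := hq
  have hlen : (counts.take 26).length ≤ 26 := by simp
  have e : k1 = k2 := singleton_ofNat_inj k1 k2 (by omega) (by omega)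
    (by simpa using heq)
  simp [e] at hlt

theorem solve_eq_alt (counts : List Int) (hpre : ∀ c ∈ counts.take 26, 1 ≤ c) :
    solve counts = solve_alt counts := by
  unfold solve solve_alt
  set rem0 := (PySem.List.enumerate (counts.take 26) 0).map
    (fun ic => (String.singleton (Char.ofNat (65 + ic.1.toNat)), ic.2)) with hrem0
  have hinit : mapNeg rem0 = List.zip (counts.map (fun c => -c)) lettersAZ := init_eq counts
  have hnd0 : (rem0.map Prod.fst).Nodup := init_nodup counts
  have hpos0 : ∀ pc ∈ rem0, 1 ≤ pc.2 := by
    intro pc hpc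
    rw [hrem0, List.mem_map] at hpc
    obtain ⟨ic, hic, rfl⟩ := hpc
    rw [PySem.List.mem_enumerate_iff] at hic
    obtain ⟨k, hk, rfl⟩ := hic
    exact hpre _ (List.getElem_mem hk)
  have hsndnd : ((List.zip (counts.map (fun c => -c)) lettersAZ).map Prod.snd).Nodup := by
    rw [← hinit]
    simpa [mapNeg, List.map_map, Function.comp_def] using hnd0
  have hp : (heapify (List.zip (counts.map (fun c => -c)) lettersAZ)).Perm (mapNeg rem0) := by
    rw [hinit]
    simpa using foldl_heapPush_perm (List.zip (counts.map (fun c => -c)) lettersAZ) []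
  have hs : (heapify (List.zip (counts.map (fun c => -c)) lettersAZ)).Pairwise
      (fun a b => toLex a < toLex b) :=
    foldl_heapPush_pairwise _ [] (by simp) (by simpa using hsndnd)
  have hheap : heapify (List.zip (counts.map (fun c => -c)) lettersAZ)
      = mapNeg (PySem.List.sorted2 rem0 (fun pc => -pc.2) (fun pc => pc.1) false) :=
    (sortChar rem0 _ hp hs).symm
  rw [hheap]
  exact main_loop (fuelOf counts) rem0 hnd0 hpos0

-- ===== VERDICT (by name: the statement is the Claim_ definition above) =====
theorem solve_spec : Claim_equal_solve := by
  intro counts _ hpre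
  unfold Spec_solve
  exact solve_eq_alt counts hpre
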